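-- pv_equiv track=rewrite | github.com/GolakiyaVishal/python2 | odd_occurrences_in_array.py | solution
-- ===== SOURCE A (Python) =====
-- def solution(A):
--     stack = []
--     for e in A:
--         if e in stack:
--             stack.remove(e)
--         else:
--             stack.append(e)
--
--     if len(stack) > 0:
--         return stack[0]
--     else:
--         return -1
-- ===== SOURCE B (Python) =====
-- def solution(A):
--     count = {}
--     for e in A:
--         count[e] = count.get(e, 0) + 1
--     remaining = dict(count)
--     for e in A:
--         remaining[e] -= 1
--         if remaining[e] == 0 and count[e] % 2 == 1:
--             return e
--     return -1
-- ===== Notes on version B (the rewrite author's own statement) =====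
-- stated objective: faster
-- what changed: Replaced the toggling stack with O(n) membership/remove scans by a single counting pass (dict of occurrence counts) plus one scan that returns the first element whose occurrences are exhausted and whose total count is odd (= odd-count element with earliest last occurrence).
import Mathlib
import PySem

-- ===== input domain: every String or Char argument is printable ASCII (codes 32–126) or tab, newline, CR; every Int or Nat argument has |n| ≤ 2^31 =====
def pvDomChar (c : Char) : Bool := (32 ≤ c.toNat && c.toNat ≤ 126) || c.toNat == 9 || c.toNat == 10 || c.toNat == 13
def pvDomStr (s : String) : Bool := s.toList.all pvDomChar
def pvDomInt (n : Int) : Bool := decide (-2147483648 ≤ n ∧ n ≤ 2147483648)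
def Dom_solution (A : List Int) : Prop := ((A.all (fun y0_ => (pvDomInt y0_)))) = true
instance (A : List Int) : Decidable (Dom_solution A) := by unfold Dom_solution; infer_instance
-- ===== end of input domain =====

-- B replaces A's quadratic toggling stack by one counting pass plus one scan (objective: faster); same return value, neither program mutates its argument.

-- ===== PORT A =====
-- 'if e in stack: stack.remove(e) else: stack.append(e)'  (remove = erase first occurrence)
def aStep (stack : List Int) (e : Int) : List Int :=
  if stack.contains e then stack.erase e else stack ++ [e]

def solution (A : List Int) : Int :=
  let stack := A.foldl aStep []
  match stack with
  | [] => -1            -- len(stack) == 0: return -1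
  | x :: _ => x         -- return stack[0]

-- ===== PORT B =====
-- 'remaining[e] -= 1' is ported as modify with default 0; this is exact here because the
-- key is always present (count, copied into remaining, holds every element of A).
def bFind (count : PySem.Dict Int Int) : PySem.Dict Int Int → List Int → Int
  | _, [] => -1
  | remaining, e :: rest =>
      let remaining' := remaining.modify e 0 (fun c => c - 1)
      if remaining'.getD e 0 == 0 && PySem.Int.mod (count.getD e 0) 2 == 1 then e
      else bFind count remaining' rest

def solution_alt (A : List Int) : Int :=
  let count := A.foldl (fun d e => d.insert e (d.getD e 0 + 1)) PySem.Dict.empty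
  bFind count count A

-- ===== PRECONDITION & SPEC =====
def Spec_solution (A : List Int) (out : Int) : Prop := out = solution_alt A
instance (A : List Int) (out : Int) : Decidable (Spec_solution A out) := by unfold Spec_solution; infer_instance

-- ===== CLAIM (what is proved, stated in full; the proofs are below) =====
def Claim_equal_solution : Prop := ∀ (A : List Int), Dom_solution A → Spec_solution A (solution A)

-- ===== LEMMAS AND PROOFS =====

-- S pre rest: the elements of rest sitting at positions that are last occurrences within rest
-- and whose total count in pre ++ rest is odd, in position order.
def S : List Int → List Int → List Int
  | _, [] => []
  | pre, e :: rest =>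
      if !rest.contains e && decide (pre.count e % 2 = 0) then e :: S (pre ++ [e]) rest
      else S (pre ++ [e]) rest

def headRes : List Int → Int
  | [] => -1
  | x :: _ => x

lemma mem_S : ∀ (rest pre : List Int) (x : Int),
    x ∈ S pre rest ↔ x ∈ rest ∧ (pre ++ rest).count x % 2 = 1
  | [], pre, x => by simp [S]
  | e :: rest, pre, x => by
    have hcnt : ∀ y : Int, (pre ++ [e] ++ rest).count y = (pre ++ e :: rest).count y := by
      intro y; simp [List.count_append, List.count_cons]
    rw [S]
    split_ifs with h
    · simp only [Bool.and_eq_true, Bool.not_eq_true', decide_eq_true_eq] at h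
      obtain ⟨heb, hp⟩ := h
      have he : e ∉ rest := by simpa using heb
      have h0 : rest.count e = 0 := List.count_eq_zero.mpr he
      simp only [List.mem_cons, mem_S rest (pre ++ [e]) x, hcnt]
      constructor
      · rintro (rfl | ⟨hx, hodd⟩)
        · refine ⟨Or.inl rfl, ?_⟩
          have hc : (pre ++ x :: rest).count x = pre.count x + 1 := by
            simp [List.count_append, h0]
          omega
        · exact ⟨Or.inr hx, hodd⟩
      · rintro ⟨(rfl | hx), hodd⟩
        · exact Or.inl rfl
        · exact Or.inr ⟨hx, hodd⟩
    · rw [mem_S rest (pre ++ [e]) x]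
      simp only [List.mem_cons, hcnt]
      constructor
      · rintro ⟨hx, hodd⟩; exact ⟨Or.inr hx, hodd⟩
      · rintro ⟨(rfl | hx), hodd⟩
        · by_cases he : x ∈ rest
          · exact ⟨he, hodd⟩
          · exfalso
            have h0 : rest.count x = 0 := List.count_eq_zero.mpr he
            have hp : ¬ (pre.count x % 2 = 0) := by
              intro hp0
              exact h (by simp [he, hp0])
            have hc : (pre ++ x :: rest).count x = pre.count x + 1 := by
              simp [List.count_append, h0]
            omega
        · exact ⟨hx, hodd⟩

lemma S_subset {pre rest : List Int} {x : Int} (h : x ∈ S pre rest) : x ∈ rest :=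
  ((mem_S rest pre x).mp h).1

lemma S_append (e : Int) : ∀ (rest pre : List Int),
    S pre (rest ++ [e]) =
      if (pre ++ rest).count e % 2 = 1 then (S pre rest).erase e else S pre rest ++ [e]
  | [], pre => by
    by_cases hp : pre.count e % 2 = 0
    · simp [S, hp]
    · simp [S, hp]
  | f :: t, pre => by
    simp only [List.cons_append]
    conv_lhs => rw [S]
    conv_rhs => rw [S]
    rw [S_append e t (pre ++ [f])]
    by_cases hef : e = f
    · subst hef
      have hcf : ((t ++ [e]).contains e) = true := by simp
      have hc1 : (pre ++ [e] ++ t).count e = (pre ++ e :: t).count e := by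
        simp [List.count_append]
      rw [hcf,
          if_neg (show ¬ ((!true && decide (pre.count e % 2 = 0)) = true) by simp), hc1]
      by_cases ht : e ∈ t
      · have hct : t.contains e = true := by simpa using ht
        rw [hct,
            if_neg (show ¬ ((!true && decide (pre.count e % 2 = 0)) = true) by simp)]
      · have hct : t.contains e = false := by simpa using ht
        have h0 : t.count e = 0 := List.count_eq_zero.mpr ht
        have hc2 : (pre ++ e :: t).count e = pre.count e + 1 := by
          simp [List.count_append, h0]
        rw [hct]
        by_cases hp : pre.count e % 2 = 0
        · have hC0 : (pre ++ e :: t).count e % 2 = 1 := by omega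
          have hnm : e ∉ S (pre ++ [e]) t := fun hm => ht (S_subset hm)
          rw [if_pos (show ((!false && decide (pre.count e % 2 = 0)) = true) by simp [hp]),
              if_pos hC0, if_pos hC0, List.erase_cons_head, List.erase_of_not_mem hnm]
        · rw [if_neg (show ¬ ((!false && decide (pre.count e % 2 = 0)) = true) by simp [hp])]
    · have hcf : ((t ++ [e]).contains f) = t.contains f := by
        by_cases hft : f ∈ t
        · simp [hft]
        · simp [hft, Ne.symm hef]
      have hcount : (pre ++ [f] ++ t).count e = (pre ++ f :: t).count e := by
        simp [List.count_append, List.count_cons]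
      have hfe : ¬ (f == e) = true := by simp [Ne.symm hef]
      rw [hcf, hcount]
      by_cases h2 : (!t.contains f && decide (pre.count f % 2 = 0)) = true
      · rw [if_pos h2, if_pos h2, apply_ite (List.cons f)]
        congr 1
        exact (List.erase_cons_tail hfe).symm
      · rw [if_neg h2, if_neg h2]

lemma St_eq_S (A : List Int) : A.foldl aStep [] = S [] A := by
  induction A using List.reverseRecOn with
  | nil => simp [S]
  | append_singleton A e ih =>
    rw [List.foldl_append, List.foldl_cons, List.foldl_nil, ih, S_append e A [],
        List.nil_append]
    by_cases hodd : A.count e % 2 = 1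
    · have he : e ∈ S [] A := by
        rw [mem_S A [] e]
        refine ⟨List.count_pos_iff.mp (by omega), by simpa using hodd⟩
      rw [if_pos hodd, aStep, if_pos (by simpa using he)]
    · have he : e ∉ S [] A := by
        intro h
        exact hodd (by simpa using ((mem_S A [] e).mp h).2)
      rw [if_neg hodd, aStep, if_neg (by simpa using he)]

def cntD (A : List Int) : PySem.Dict Int Int :=
  A.foldl (fun d e => d.insert e (d.getD e 0 + 1)) PySem.Dict.empty

lemma cntD_getD (A : List Int) (v : Int) : (cntD A).getD v 0 = (A.count v : Int) := by
  rw [cntD, PySem.Dict.getD_foldl_insert_add_one]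
  simp

lemma dec_getD : ∀ (l : List Int) (d : PySem.Dict Int Int) (v : Int),
    (l.foldl (fun d x => d.modify x 0 (fun c => c - 1)) d).getD v 0
      = d.getD v 0 - (l.count v : Int)
  | [], d, v => by simp
  | x :: l, d, v => by
    rw [List.foldl_cons, dec_getD l, PySem.Dict.getD_modify]
    by_cases hv : v = x
    · subst hv
      simp
      ring
    · have hv' : ¬x = v := fun h => hv h.symm
      simp [hv, hv']

lemma bFind_eq (A : List Int) : ∀ (rest pre : List Int), A = pre ++ rest →
    bFind (cntD A) (pre.foldl (fun d x => d.modify x 0 (fun c => c - 1)) (cntD A)) rest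
      = headRes (S pre rest)
  | [], pre, hA => by simp [bFind, S, headRes]
  | e :: rest, pre, hA => by
    have h1 : ((pre.foldl (fun d x => d.modify x 0 (fun c => c - 1)) (cntD A)).modify e 0
          (fun c => c - 1))
        = (pre ++ [e]).foldl (fun d x => d.modify x 0 (fun c => c - 1)) (cntD A) := by
      rw [List.foldl_append]; rfl
    have hrem : ((pre ++ [e]).foldl (fun d x => d.modify x 0 (fun c => c - 1))
          (cntD A)).getD e 0 = (rest.count e : Int) := by
      rw [dec_getD, cntD_getD, hA]
      have hc : (pre ++ e :: rest).count e = (pre ++ [e]).count e + rest.count e := by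
        simp [List.count_append]
        omega
      omega
    have hAc : A.count e = pre.count e + 1 + rest.count e := by
      rw [hA]
      simp [List.count_append]
      omega
    have hmod : PySem.Int.mod ((cntD A).getD e 0) 2
        = ((A.count e % 2 : Nat) : Int) := by
      rw [cntD_getD]
      exact_mod_cast PySem.Int.mod_natCast _ 2
    simp only [bFind]
    rw [S, h1, hrem, hmod]
    by_cases ht : e ∈ rest
    · have hc0 : rest.count e ≠ 0 := by
        have := List.count_pos_iff.mpr ht
        omega
      have hB : ¬ ((((rest.count e : Int) == 0) &&
          (((A.count e % 2 : Nat) : Int) == 1)) = true) := by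
        simp [hc0]
      have hS : ¬ ((!rest.contains e && decide (pre.count e % 2 = 0)) = true) := by
        simp [ht]
      rw [if_neg hB, if_neg hS]
      exact bFind_eq A rest (pre ++ [e]) (by rw [hA]; simp)
    · have hc0 : rest.count e = 0 := List.count_eq_zero.mpr ht
      by_cases hp : pre.count e % 2 = 0
      · have hB : ((((rest.count e : Int) == 0) &&
            (((A.count e % 2 : Nat) : Int) == 1)) = true) := by
          simp [hc0]
          omega
        have hS : ((!rest.contains e && decide (pre.count e % 2 = 0)) = true) := by
          simp [ht, hp]
        rw [if_pos hB, if_pos hS]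
        rfl
      · have hB : ¬ ((((rest.count e : Int) == 0) &&
            (((A.count e % 2 : Nat) : Int) == 1)) = true) := by
          simp [hc0]
          omega
        have hS : ¬ ((!rest.contains e && decide (pre.count e % 2 = 0)) = true) := by
          simp [hp]
        rw [if_neg hB, if_neg hS]
        exact bFind_eq A rest (pre ++ [e]) (by rw [hA]; simp)

-- ===== VERDICT (by name: the statement is the Claim_ definition above) =====
theorem solution_spec : Claim_equal_solution := by
  intro A _
  unfold Spec_solution
  have hA : solution A = headRes (S [] A) := by
    simp only [solution]
    rw [St_eq_S]
    cases h : S [] A <;> simp [headRes]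
  have hB : solution_alt A = headRes (S [] A) := by
    have h := bFind_eq A A [] (by simp)
    simpa [solution_alt, cntD] using h
  rw [hA, hB]
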